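-- pv_equiv track=rewrite | github.com/wxx26caca/CSDIY | algorithm/leetcode/jianzhioffer.py | getLeastNumbers2
-- ===== SOURCE A (Python) =====
-- from typing import List
--
-- def getLeastNumbers2(arr: List[int], k: int):
--     if k >= len(arr):
--         return arr
--     def quick_sort(l, r):
--         i, j = l, r
--         while i < j:
--             while i < j and arr[j] >= arr[l]:
--                 j -= 1
--             while i < j and arr[i] <= arr[l]:
--                 i += 1
--             arr[i], arr[j] = arr[j], arr[i]
--         arr[l], arr[i] = arr[i], arr[l]
--         if k < i:
--             return quick_sort(l, i - 1)
--         if k > i: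
--             return quick_sort(i + 1, r)
--         return arr[:k]
--     return quick_sort(0, len(arr) - 1)
-- ===== SOURCE B (Python) =====
-- from typing import List
--
-- # Iterative quickselect: l/r window loop with a single flat three-way partition loop
-- # (instead of A's recursive helper with nested scanning whiles). Same in-place swaps,
-- # same return value; like A it mutates arr in place.
-- def getLeastNumbers2(arr: List[int], k: int):
--     if k >= len(arr):
--         return arr
--     l, r = 0, len(arr) - 1
--     while True:
--         i, j = l, r
--         while i < j:
--             if arr[j] >= arr[l]:
--                 j -= 1
--             elif arr[i] <= arr[l]:
--                 i += 1
--             else: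
--                 arr[i], arr[j] = arr[j], arr[i]
--         arr[l], arr[i] = arr[i], arr[l]
--         if k < i:
--             r = i - 1
--         elif k > i:
--             l = i + 1
--         else:
--             return arr[:k]
-- ===== Notes on version B (the rewrite author's own statement) =====
-- stated objective: alternative
-- what changed: Replaced the recursive quick_sort helper with an explicit l/r window loop, and the nested scanning while-loops of the partition with a single flat three-way loop (decrement j / increment i / swap per step).
import Mathlib
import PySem

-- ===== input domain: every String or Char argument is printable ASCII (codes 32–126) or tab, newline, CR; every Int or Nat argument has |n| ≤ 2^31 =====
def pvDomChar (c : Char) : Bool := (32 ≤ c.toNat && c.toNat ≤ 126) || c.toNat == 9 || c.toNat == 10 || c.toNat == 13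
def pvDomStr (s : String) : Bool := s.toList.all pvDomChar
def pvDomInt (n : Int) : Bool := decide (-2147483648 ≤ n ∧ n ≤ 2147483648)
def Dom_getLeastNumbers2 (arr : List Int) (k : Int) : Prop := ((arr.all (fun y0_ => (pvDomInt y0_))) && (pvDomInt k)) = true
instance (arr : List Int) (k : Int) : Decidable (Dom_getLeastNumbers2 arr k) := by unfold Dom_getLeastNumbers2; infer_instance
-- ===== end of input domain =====

-- B replaces A's recursive quickselect helper and nested scanning whiles by an iterative
-- l/r window loop with a single flat three-way partition loop; equal return value is proved
-- (both Pythons also mutate `arr` in place, identically — the claim here is about the return value).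


-- ===== PORT A =====
-- `arr[i]` read helper: exact for the in-range, non-negative indices that are the only
-- accesses reachable on inputs satisfying Pre_ (Python A diverges or raises elsewhere).
def pvIdx (a : List Int) (i : Int) : Int := a.getD i.toNat 0

-- `arr[i], arr[j] = arr[j], arr[i]`
def pvSwap (a : List Int) (i j : Int) : List Int :=
  (a.set i.toNat (pvIdx a j)).set j.toNat (pvIdx a i)

-- `while i < j and arr[j] >= arr[l]: j -= 1`
def scanJ (a : List Int) (l i j : Int) : Int :=
  if h : i < j ∧ pvIdx a j ≥ pvIdx a l then scanJ a l i (j - 1) else j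
termination_by (j - i).toNat
decreasing_by omega

-- `while i < j and arr[i] <= arr[l]: i += 1`
def scanI (a : List Int) (l i j : Int) : Int :=
  if h : i < j ∧ pvIdx a i ≤ pvIdx a l then scanI a l (i + 1) j else i
termination_by (j - i).toNat
decreasing_by omega

-- the `while i < j: …` partition loop of quick_sort; fuel only makes it total
-- (2*(r-l)+2 is enough on every input Pre_ admits)
def partA (a : List Int) (l i j : Int) : Nat → List Int × Int
  | 0 => (a, i)
  | f + 1 =>
    if i < j then
      let j' := scanJ a l i j
      let i' := scanI a l i j'
      partA (pvSwap a i' j') l i' j' f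
    else (a, i)

-- `quick_sort(l, r)`; fuel only makes it total (arr.length + 1 is enough under Pre_)
def quickA (a : List Int) (k l r : Int) : Nat → List Int
  | 0 => []
  | f + 1 =>
    match partA a l l r (2 * (r - l).toNat + 2) with
    | (a1, i) =>
      let a2 := pvSwap a1 l i
      if k < i then quickA a2 k l (i - 1) f
      else if k > i then quickA a2 k (i + 1) r f
      else a2.take k.toNat    -- arr[:k]; exact since k = i ≥ 0 here

def getLeastNumbers2 (arr : List Int) (k : Int) : List Int :=
  if k ≥ (arr.length : Int) then arr
  else quickA arr k 0 ((arr.length : Int) - 1) (arr.length + 1)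

-- ===== PORT B =====
-- the flat three-way partition loop of Source B; fuel only makes it total
def partB (a : List Int) (l i j : Int) : Nat → List Int × Int
  | 0 => (a, i)
  | f + 1 =>
    if i < j then
      if pvIdx a j ≥ pvIdx a l then partB a l i (j - 1) f
      else if pvIdx a i ≤ pvIdx a l then partB a l (i + 1) j f
      else partB (pvSwap a i j) l i j f
    else (a, i)

-- the `while True` window loop of Source B; fuel only makes it total
def loopB (a : List Int) (k l r : Int) : Nat → List Int
  | 0 => []
  | f + 1 =>
    match partB a l l r (2 * (r - l).toNat + 2) with
    | (a1, i) =>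
      let a2 := pvSwap a1 l i
      if k < i then loopB a2 k l (i - 1) f
      else if k > i then loopB a2 k (i + 1) r f
      else a2.take k.toNat

def getLeastNumbers2_alt (arr : List Int) (k : Int) : List Int :=
  if k ≥ (arr.length : Int) then arr
  else loopB arr k 0 ((arr.length : Int) - 1) (arr.length + 1)

-- ===== PRECONDITION & SPEC =====
-- Pre_ excludes exactly the inputs where Python A does not return: for k < 0 with
-- k < len(arr) it hits unbounded recursion (RecursionError; IndexError on []).
def Pre_getLeastNumbers2 (arr : List Int) (k : Int) : Prop :=
  0 ≤ k ∨ (arr.length : Int) ≤ k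

instance (arr : List Int) (k : Int) : Decidable (Pre_getLeastNumbers2 arr k) := by
  unfold Pre_getLeastNumbers2; infer_instance

def pvWitness_getLeastNumbers2 : List Int × Int := ([3, 1, 2, 0], 2)

def Spec_getLeastNumbers2 (arr : List Int) (k : Int) (out : List Int) : Prop := out = getLeastNumbers2_alt arr k
instance (arr : List Int) (k : Int) (out : List Int) : Decidable (Spec_getLeastNumbers2 arr k out) := by unfold Spec_getLeastNumbers2; infer_instance

-- ===== CLAIM (what is proved, stated in full; the proofs are below) =====
def Claim_equal_getLeastNumbers2 : Prop := ∀ (arr : List Int) (k : Int), Dom_getLeastNumbers2 arr k → Pre_getLeastNumbers2 arr k → Spec_getLeastNumbers2 arr k (getLeastNumbers2 arr k)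

-- ===== LEMMAS AND PROOFS =====

lemma set_getD_self (a : List Int) (n : Nat) : a.set n (a[n]?.getD 0) = a := by
  induction a generalizing n with
  | nil => rfl
  | cons x xs ih => cases n with
    | zero => simp
    | succ m => simp [List.set, ih]

lemma pvSwap_self (a : List Int) (i : Int) : pvSwap a i i = a := by
  unfold pvSwap
  rw [List.set_set]
  simpa [pvIdx, List.getD] using set_getD_self a i.toNat

lemma pvSwap_length (a : List Int) (i j : Int) : (pvSwap a i j).length = a.length := by
  simp [pvSwap]

lemma pvIdx_swap_other (a : List Int) (i j x : Int)
    (hxi : x.toNat ≠ i.toNat) (hxj : x.toNat ≠ j.toNat) :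
    pvIdx (pvSwap a i j) x = pvIdx a x := by
  simp [pvSwap, pvIdx, List.getD, List.getElem?_set_ne (Ne.symm hxi), List.getElem?_set_ne (Ne.symm hxj)]

lemma pvIdx_swap_right (a : List Int) (i j : Int) (hj : j.toNat < a.length) :
    pvIdx (pvSwap a i j) j = pvIdx a i := by
  simp [pvSwap, pvIdx, List.getD, hj]

lemma ne_toNat_of_idx_ne (a : List Int) (x y : Int) (h : pvIdx a x ≠ pvIdx a y) :
    x.toNat ≠ y.toNat := by
  intro he; exact h (by simp [pvIdx, he])

-- scan bounds
lemma scanJ_bounds' : ∀ (n : Nat) (a : List Int) (l i j : Int), (j - i).toNat ≤ n → i ≤ j →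
    i ≤ scanJ a l i j ∧ scanJ a l i j ≤ j := by
  intro n
  induction n with
  | zero =>
    intro a l i j hn h
    rw [scanJ, dif_neg (by omega)]; omega
  | succ m ih =>
    intro a l i j hn h
    rw [scanJ]
    split
    · rename_i hc
      have := ih a l i (j - 1) (by omega) (by omega)
      omega
    · omega

lemma scanJ_bounds (a : List Int) (l i j : Int) (h : i ≤ j) :
    i ≤ scanJ a l i j ∧ scanJ a l i j ≤ j := scanJ_bounds' (j - i).toNat a l i j le_rfl h

lemma scanI_bounds' : ∀ (n : Nat) (a : List Int) (l i j : Int), (j - i).toNat ≤ n → i ≤ j →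
    i ≤ scanI a l i j ∧ scanI a l i j ≤ j := by
  intro n
  induction n with
  | zero =>
    intro a l i j hn h
    rw [scanI, dif_neg (by omega)]; omega
  | succ m ih =>
    intro a l i j hn h
    rw [scanI]
    split
    · rename_i hc
      have := ih a l (i + 1) j (by omega) (by omega)
      omega
    · omega

lemma scanI_bounds (a : List Int) (l i j : Int) (h : i ≤ j) :
    i ≤ scanI a l i j ∧ scanI a l i j ≤ j := scanI_bounds' (j - i).toNat a l i j le_rfl h

-- result-index bounds and length preservation of partA
lemma partA_bounds (F : Nat) :
    ∀ (a : List Int) (l i j : Int), i ≤ j →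
      i ≤ (partA a l i j F).2 ∧ (partA a l i j F).2 ≤ j ∧ (partA a l i j F).1.length = a.length := by
  induction F with
  | zero => intro a l i j h; simpa [partA] using h
  | succ f ih =>
    intro a l i j h
    by_cases hij : i < j
    · have hj' := scanJ_bounds a l i j (le_of_lt hij)
      have hi' := scanI_bounds a l i (scanJ a l i j) hj'.1
      have := ih (pvSwap a (scanI a l i (scanJ a l i j)) (scanJ a l i j)) l
        (scanI a l i (scanJ a l i j)) (scanJ a l i j) hi'.2
      simp only [partA, if_pos hij]
      refine ⟨by omega, by omega, ?_⟩
      rw [this.2.2, pvSwap_length]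
    · simpa [partA, if_neg hij] using h

-- the termination measure of the flat loop
def phiP (a : List Int) (l i j : Int) : Nat :=
  2 * (j - i).toNat + (if pvIdx a j < pvIdx a l then 1 else 0)

-- one j-step of A's partition
lemma A_stepJ (a : List Int) (l i j : Int) (f : Nat) (hij : i < j)
    (hc : pvIdx a j ≥ pvIdx a l) :
    partA a l i j (f + 1) = partA a l i (j - 1) (f + 1) := by
  have hsc : scanJ a l i j = scanJ a l i (j - 1) := by
    rw [scanJ]; exact dif_pos ⟨hij, hc⟩
  by_cases h2 : i < j - 1
  · simp only [partA, if_pos hij, if_pos h2, hsc]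
  · -- i = j - 1
    have hjj : j - 1 = i := by omega
    have hscj : scanJ a l i (j - 1) = i := by
      rw [hjj, scanJ, dif_neg]; omega
    have hsci : scanI a l i i = i := by
      rw [scanI, dif_neg]; omega
    simp only [partA, if_pos hij, if_neg h2, hsc, hscj, hsci, pvSwap_self]
    cases f with
    | zero => simp [partA]
    | succ f' => simp [partA]

-- one i-step of A's partition
lemma A_stepI (a : List Int) (l i j : Int) (f : Nat) (hij : i < j)
    (hcj : ¬ pvIdx a j ≥ pvIdx a l) (hci : pvIdx a i ≤ pvIdx a l) :
    partA a l i j (f + 1) = partA a l (i + 1) j (f + 1) := by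
  have hscj : scanJ a l i j = j := by rw [scanJ, dif_neg]; tauto
  have hsci : scanI a l i j = scanI a l (i + 1) j := by
    rw [scanI]; exact dif_pos ⟨hij, hci⟩
  by_cases h2 : i + 1 < j
  · have hscj2 : scanJ a l (i + 1) j = j := by rw [scanJ, dif_neg]; tauto
    simp only [partA, if_pos hij, if_pos h2, hscj, hscj2, hsci]
  · -- i + 1 = j
    have hjj : j = i + 1 := by omega
    subst hjj
    have hsci2 : scanI a l (i + 1) (i + 1) = i + 1 := by
      rw [scanI, dif_neg]; omega
    simp only [partA, if_pos hij, if_neg h2, hscj, hsci, hsci2, pvSwap_self]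
    cases f with
    | zero => simp [partA]
    | succ f' => simp [partA]

-- main partition equivalence, by strong induction on a bound of the measure
lemma part_equiv : ∀ (n : Nat) (a : List Int) (l i j : Int) (fA fB : Nat),
    0 ≤ l → l ≤ i → j < (a.length : Int) →
    phiP a l i j ≤ n → phiP a l i j + 1 ≤ fA → phiP a l i j + 1 ≤ fB →
    partA a l i j fA = partB a l i j fB := by
  intro n
  induction n using Nat.strong_induction_on with
  | _ n ih =>
    intro a l i j fA fB hl hli hjlen hn hfA hfB
    obtain ⟨fa, rfl⟩ : ∃ fa, fA = fa + 1 := ⟨fA - 1, by omega⟩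
    obtain ⟨fb, rfl⟩ : ∃ fb, fB = fb + 1 := ⟨fB - 1, by omega⟩
    by_cases hij : i < j
    · have hd : 1 ≤ (j - i).toNat := by omega
      have hphilb : 2 ≤ phiP a l i j := by unfold phiP; split <;> omega
      by_cases hcj : pvIdx a j ≥ pvIdx a l
      · -- j-step on both sides
        have hphi : phiP a l i (j - 1) + 1 ≤ phiP a l i j := by
          unfold phiP
          have h1 : ((j - 1) - i).toNat = (j - i).toNat - 1 := by omega
          rw [if_neg (show ¬ pvIdx a j < pvIdx a l by omega), h1]
          split <;> omega
        rw [A_stepJ a l i j fa hij hcj]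
        rw [show partB a l i j (fb + 1) = partB a l i (j - 1) fb from by
          simp only [partB, if_pos hij, if_pos hcj]]
        exact ih (n - 1) (by omega) a l i (j - 1) (fa + 1) fb hl hli (by omega)
          (by omega) (by omega) (by omega)
      · by_cases hci : pvIdx a i ≤ pvIdx a l
        · -- i-step on both sides
          have hvj : pvIdx a j < pvIdx a l := by omega
          have hphi : phiP a l (i + 1) j + 1 ≤ phiP a l i j := by
            unfold phiP
            have h1 : (j - (i + 1)).toNat = (j - i).toNat - 1 := by omega
            rw [if_pos hvj, h1]
            omega
          rw [A_stepI a l i j fa hij hcj hci]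
          rw [show partB a l i j (fb + 1) = partB a l (i + 1) j fb from by
            simp only [partB, if_pos hij, if_neg hcj, if_pos hci]]
          exact ih (n - 1) (by omega) a l (i + 1) j (fa + 1) fb hl (by omega) hjlen
            (by omega) (by omega) (by omega)
        · -- swap step on both sides
          have hvj : pvIdx a j < pvIdx a l := by omega
          have hvi : pvIdx a l < pvIdx a i := by omega
          have hjn : j.toNat < a.length := by omega
          have hli' : l.toNat ≠ i.toNat := ne_toNat_of_idx_ne a l i (by omega)
          have hlj' : l.toNat ≠ j.toNat := ne_toNat_of_idx_ne a l j (by omega)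
          have hswl : pvIdx (pvSwap a i j) l = pvIdx a l :=
            pvIdx_swap_other a i j l hli' hlj'
          have hswj : pvIdx (pvSwap a i j) j = pvIdx a i :=
            pvIdx_swap_right a i j hjn
          have hphi : phiP (pvSwap a i j) l i j + 1 ≤ phiP a l i j := by
            unfold phiP
            rw [hswl, hswj, if_pos hvj, if_neg (show ¬ pvIdx a i < pvIdx a l by omega)]
          have hA : partA a l i j (fa + 1) = partA (pvSwap a i j) l i j fa := by
            have hscj : scanJ a l i j = j := by rw [scanJ, dif_neg]; tauto
            have hsci : scanI a l i j = i := by rw [scanI, dif_neg]; tauto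
            simp only [partA, if_pos hij, hscj, hsci]
          have hB : partB a l i j (fb + 1) = partB (pvSwap a i j) l i j fb := by
            simp only [partB, if_pos hij, if_neg hcj, if_neg hci]
          rw [hA, hB]
          exact ih (n - 1) (by omega) (pvSwap a i j) l i j fa fb hl hli
            (by rw [pvSwap_length]; exact hjlen) (by omega) (by omega) (by omega)
    · simp only [partA, partB, if_neg hij]

-- outer loop equivalence
lemma outer_equiv : ∀ (fuel : Nat) (a : List Int) (k l r : Int),
    0 ≤ l → l ≤ k → k ≤ r → r < (a.length : Int) →
    quickA a k l r fuel = loopB a k l r fuel := by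
  intro fuel
  induction fuel with
  | zero => intro a k l r _ _ _ _; rfl
  | succ f ih =>
    intro a k l r hl hlk hkr hr
    have hlr : l ≤ r := le_trans hlk hkr
    have hpe : partA a l l r (2 * (r - l).toNat + 2) = partB a l l r (2 * (r - l).toNat + 2) := by
      apply part_equiv (phiP a l l r) a l l r _ _ hl le_rfl hr le_rfl
      all_goals unfold phiP; split <;> omega
    have hb := partA_bounds (2 * (r - l).toNat + 2) a l l r hlr
    simp only [quickA, loopB, hpe] at *
    obtain ⟨hbi1, hbi2, hblen⟩ := hb
    set p := partB a l l r (2 * (r - l).toNat + 2) with hp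
    obtain ⟨a1, i⟩ := p
    simp only at hbi1 hbi2 hblen ⊢
    have hlen2 : ((pvSwap a1 l i).length : Int) = (a.length : Int) := by
      rw [pvSwap_length, hblen]
    by_cases h1 : k < i
    · simp only [if_pos h1]
      exact ih _ _ _ _ hl hlk (by omega) (by omega)
    · by_cases h2 : k > i
      · simp only [if_neg h1, if_pos h2]
        exact ih _ _ _ _ (by omega) (by omega) hkr (by omega)
      · simp only [if_neg h1, if_neg h2]

-- ===== VERDICT (by name: the statement is the Claim_ definition above) =====
theorem getLeastNumbers2_spec : Claim_equal_getLeastNumbers2 := by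
  intro arr k _ hpre
  unfold Spec_getLeastNumbers2 getLeastNumbers2 getLeastNumbers2_alt
  by_cases h : k ≥ (arr.length : Int)
  · simp [h]
  · rw [if_neg h, if_neg h]
    have hk : 0 ≤ k := by
      rcases hpre with h0 | h0
      · exact h0
      · omega
    exact outer_equiv (arr.length + 1) arr k 0 ((arr.length : Int) - 1) le_rfl hk (by omega) (by omega)
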